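-- pv_equiv track=rewrite | github.com/arkaninger/AdventOfCode2018 | Day06/exercise_1.py | map_the_grid
-- ===== SOURCE A (Python) =====
-- import itertools
--
-- def distance(origin, other):
--     return abs(origin[0] - other[0]) + abs(origin[1] - other[1])
--
-- def bounds(points):
--     """Return minx,maxx,miny,maxy of the grid that encloses all points, plus one extra all around."""
--     return (
--         min(p[0] for p in points) - 1,
--         max(p[0] for p in points) + 1,
--         min(p[1] for p in points) - 1,
--         max(p[1] for p in points) + 1,
--     )
--
-- def grid_points(minx, maxx, miny, maxy):
--     """Yield all points in the grid."""
--     # TODO: still need to understand how this method works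
--     yx = itertools.product(range(miny, maxy+1), range(minx, maxx+1))
--     return ((x,y) for y,x in yx)
--
-- def map_the_grid(points):
--     # return a dict which represents a grid point (key) and the index of the closest coordinate (value);
--     # no dict entry (thus, None) if two or more coordinates are at the same distance
--     whole_grid = {}
--     # iterate over the whole grid whose bounding box is based on the list of input coordinates
--     for grid_point in grid_points(*bounds(points)):
--         # assign an array with the distance of every single input coordinate to the specific grid point
--         distances = [(distance(grid_point, point), index_point) for index_point, point in enumerate(points)]
--         # sort the array so the closest coordinate gets index 0
--         distances.sort()
--         # if first and second distances are different (thus, no tie), assign the input coordinate to that grid point; else, assign nothing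
--         if distances[0][0] != distances[1][0]:
--             whole_grid[grid_point] = distances[0][1]
--     return whole_grid
-- ===== SOURCE B (Python) =====
-- def map_the_grid(points):
--     # per grid cell: one distance list, then min / count / index — no sorting, no (distance, index) pairs
--     minx = min(p[0] for p in points) - 1
--     maxx = max(p[0] for p in points) + 1
--     miny = min(p[1] for p in points) - 1
--     maxy = max(p[1] for p in points) + 1
--     whole_grid = {}
--     for y in range(miny, maxy + 1):
--         for x in range(minx, maxx + 1):
--             ds = [abs(x - px) + abs(y - py) for px, py in points]
--             m = min(ds)
--             if ds.count(m) == 1: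
--                 whole_grid[(x, y)] = ds.index(m)
--     return whole_grid
-- ===== Notes on version B (the rewrite author's own statement) =====
-- stated objective: faster
-- what changed: Per grid cell, A builds a list of (distance, index) pairs and sorts it to inspect the two smallest; B never sorts: it builds the plain distance list and uses min, count and index of the minimum to decide ownership and ties.
import Mathlib
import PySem

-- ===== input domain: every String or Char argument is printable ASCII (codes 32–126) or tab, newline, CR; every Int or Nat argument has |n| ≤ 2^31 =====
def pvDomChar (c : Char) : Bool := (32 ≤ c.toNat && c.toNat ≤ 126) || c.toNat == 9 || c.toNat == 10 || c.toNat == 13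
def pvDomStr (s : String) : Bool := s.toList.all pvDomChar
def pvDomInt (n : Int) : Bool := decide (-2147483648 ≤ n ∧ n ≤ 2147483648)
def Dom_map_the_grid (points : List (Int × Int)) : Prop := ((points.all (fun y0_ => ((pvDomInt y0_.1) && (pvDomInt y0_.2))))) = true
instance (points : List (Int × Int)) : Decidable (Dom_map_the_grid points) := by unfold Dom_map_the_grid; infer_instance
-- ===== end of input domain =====

-- B replaces A's per-cell "build (distance, index) pairs and sort them" by a sort-free pass over the
-- plain distance list (min, then count/index of the minimum); measured faster by a constant factor.
-- A returns a dict keyed by distinct grid points; per the type convention it is rendered here as the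
-- insertion-ordered list of (x, y, owner) triples (each key is inserted exactly once, so insert = append).

-- ===== PORT A =====
-- helper `distance(origin, other)` of A's module
def pvDistA (origin other : Int × Int) : Int := |origin.1 - other.1| + |origin.2 - other.2|

-- loop body of A's `for grid_point in grid_points(...)`: distances list, sort, compare first two
def pvStepA (points : List (Int × Int)) (acc : List (Int × Int × Int)) (gp : Int × Int) :
    List (Int × Int × Int) :=
  let distances := PySem.List.sorted2
    ((PySem.List.enumerate points 0).map (fun ip => (pvDistA gp ip.2, ip.1)))
    (fun t => t.1) (fun t => t.2)
  match distances with
  | d0 :: d1 :: _ => if d0.1 ≠ d1.1 then acc ++ [(gp.1, gp.2, d0.2)] else acc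
  | _ => acc   -- fewer than 2 points: Python raises IndexError here (excluded by Pre_)

def map_the_grid (points : List (Int × Int)) : List (Int × Int × Int) :=
  match PySem.List.min? (points.map (fun p => p.1)) (fun v => v),
        PySem.List.max? (points.map (fun p => p.1)) (fun v => v),
        PySem.List.min? (points.map (fun p => p.2)) (fun v => v),
        PySem.List.max? (points.map (fun p => p.2)) (fun v => v) with
  | some mnx, some mxx, some mny, some mxy =>
      let minx := mnx - 1
      let maxx := mxx + 1
      let miny := mny - 1
      let maxy := mxy + 1
      -- grid_points: itertools.product(range(miny, maxy+1), range(minx, maxx+1)), yielding (x, y)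
      let grid := (PySem.List.pyRange miny (maxy + 1) 1).flatMap
        (fun y => (PySem.List.pyRange minx (maxx + 1) 1).map (fun x => (x, y)))
      grid.foldl (pvStepA points) []
  | _, _, _, _ => []   -- empty points: Python's min() raises ValueError (excluded by Pre_)

-- ===== PORT B =====
-- loop body of B's inner `for x in range(...)`: distance list, min, count, index — no sort
def pvStepB (points : List (Int × Int)) (acc : List (Int × Int × Int)) (x y : Int) :
    List (Int × Int × Int) :=
  let ds := points.map (fun p => |x - p.1| + |y - p.2|)
  match PySem.List.min? ds (fun v => v) with
  | some m =>
      if PySem.List.count ds m = 1 then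
        match PySem.List.index? ds m with
        | some k => acc ++ [(x, y, (k : Int))]
        | none => acc   -- unreachable: the minimum is a member of ds
      else acc
  | none => acc   -- unreachable: points ≠ [] whenever the bounds matched

-- Source B computes the four bounds by four separate min()/max() calls; each is ported as its own Option match
def map_the_grid_alt (points : List (Int × Int)) : List (Int × Int × Int) :=
  match PySem.List.min? (points.map (fun p => p.1)) (fun v => v) with
  | none => []   -- empty points: Python's min() raises ValueError (excluded by Pre_)
  | some mnx =>
    match PySem.List.max? (points.map (fun p => p.1)) (fun v => v) with
    | none => []
    | some mxx =>
      match PySem.List.min? (points.map (fun p => p.2)) (fun v => v) with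
      | none => []
      | some mny =>
        match PySem.List.max? (points.map (fun p => p.2)) (fun v => v) with
        | none => []
        | some mxy =>
          let minx := mnx - 1
          let maxx := mxx + 1
          let miny := mny - 1
          let maxy := mxy + 1
          (PySem.List.pyRange miny (maxy + 1) 1).foldl
            (fun acc y => (PySem.List.pyRange minx (maxx + 1) 1).foldl
              (fun acc x => pvStepB points acc x y) acc) []

-- ===== PRECONDITION & SPEC =====
-- Pre_ excludes exactly the inputs on which A raises: the empty list (ValueError from min()) and
-- single-point lists (IndexError at distances[1]).
def Pre_map_the_grid (points : List (Int × Int)) : Prop := 2 ≤ points.length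
instance (points : List (Int × Int)) : Decidable (Pre_map_the_grid points) := by
  unfold Pre_map_the_grid; infer_instance

def pvWitness_map_the_grid : (List (Int × Int)) := [(0, 0), (3, 2)]

def Spec_map_the_grid (points : List (Int × Int)) (out : List (Int × Int × Int)) : Prop := out = map_the_grid_alt points
instance (points : List (Int × Int)) (out : List (Int × Int × Int)) : Decidable (Spec_map_the_grid points out) := by unfold Spec_map_the_grid; infer_instance

-- ===== CLAIM (what is proved, stated in full; the proofs are below) =====
def Claim_equal_map_the_grid : Prop := ∀ (points : List (Int × Int)), Dom_map_the_grid points → Pre_map_the_grid points → Spec_map_the_grid points (map_the_grid points)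

-- ===== LEMMAS AND PROOFS =====

-- the lexicographic key under which Python sorts (distance, index) pairs
def pvKey (t : Int × Int) : Lex (Int × Int) := toLex t

-- A's `distances.sort()` (= sorted2 with fst/snd keys) is PySem.List.sorted under the lex key
theorem pvSorted2_eq_sorted_lex (l : List (Int × Int)) :
    PySem.List.sorted2 l (fun t => t.1) (fun t => t.2) = PySem.List.sorted l pvKey := by
  rw [PySem.List.sorted_eq_foldl_insertBy]
  simp only [PySem.List.sorted2]
  congr 1
  funext acc t
  congr 1
  funext a b
  show (decide (a.1 < b.1) || (!decide (b.1 < a.1) && decide (a.2 < b.2))) = decide (pvKey a < pvKey b)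
  simp only [pvKey, Prod.Lex.lt_iff, ofLex_toLex]
  by_cases h1 : a.1 < b.1 <;> by_cases h2 : b.1 < a.1 <;> by_cases h3 : a.2 < b.2 <;>
    simp [h1, h2, h3] <;> omega

-- two distinct members both satisfying p force countP ≥ 2
theorem pvtwo_le_countP {α : Type} [BEq α] [LawfulBEq α] (p : α → Bool) (l : List α) {a b : α}
    (ha : a ∈ l) (hb : b ∈ l) (hne : a ≠ b) (hpa : p a) (hpb : p b) : 2 ≤ l.countP p := by
  have hperm := List.perm_cons_erase ha
  have hb' : b ∈ l.erase a := (List.mem_erase_of_ne (Ne.symm hne)).mpr hb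
  have h1 : 0 < (l.erase a).countP p := List.countP_pos_iff.mpr ⟨b, hb', hpb⟩
  have h2 := hperm.countP_eq p
  rw [List.countP_cons, hpa] at h2
  simp at h2
  omega

theorem pvKey_le_fst {u v : Int × Int} (h : pvKey u ≤ pvKey v) : u.1 ≤ v.1 := by
  rw [pvKey, pvKey, Prod.Lex.le_iff] at h
  simp only [ofLex_toLex] at h
  rcases h with h | ⟨h, _⟩ <;> omega

-- per-cell equivalence: A's sort-and-look-at-two equals B's min/count/index
theorem pvcell_eq (points : List (Int × Int)) (hp : 2 ≤ points.length)
    (acc : List (Int × Int × Int)) (x y : Int) :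
    pvStepA points acc (x, y) = pvStepB points acc x y := by
  have hgp : pvDistA (x, y) = (fun p : Int × Int => |x - p.1| + |y - p.2|) := rfl
  set ds := points.map (fun p : Int × Int => |x - p.1| + |y - p.2|) with hds
  set l := (PySem.List.enumerate points 0).map
      (fun ip : Int × (Int × Int) => (pvDistA (x, y) ip.2, ip.1)) with hl
  have hmapfst : l.map (fun t => t.1) = ds := by
    rw [hl, List.map_map]
    have : ((fun t : Int × Int => t.1) ∘ fun ip : Int × (Int × Int) => (pvDistA (x, y) ip.2, ip.1))
        = (fun p : Int × Int => |x - p.1| + |y - p.2|) ∘ (fun ip : Int × (Int × Int) => ip.2) := rfl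
    rw [this, ← List.map_map, PySem.List.map_snd_enumerate]
  have hlenl : l.length = points.length := by
    rw [hl]; simp [PySem.List.length_enumerate]
  have hlends : ds.length = points.length := by rw [hds]; simp
  -- the minimum distance
  obtain ⟨m, hm⟩ : ∃ m, PySem.List.min? ds (fun v => v) = some m := by
    cases h : PySem.List.min? ds (fun v => v) with
    | none =>
        rw [PySem.List.min?_eq_none_iff] at h
        exfalso; have := hlends; rw [h] at this; simp at this; omega
    | some m => exact ⟨m, rfl⟩
  have hmmem : m ∈ ds := PySem.List.min?_mem hm
  have hmmin : ∀ z ∈ ds, m ≤ z := fun z hz => PySem.List.min?_isMin hm z hz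
  -- the sorted list
  have hs2 := pvSorted2_eq_sorted_lex l
  have hperm : (PySem.List.sorted l pvKey).Perm l := PySem.List.sorted_perm l pvKey false
  have hpw := PySem.List.sorted_pairwise l pvKey
  have hslen : 2 ≤ (PySem.List.sorted l pvKey).length := by
    rw [hperm.length_eq, hlenl]; exact hp
  obtain ⟨a, b', t, hs⟩ : ∃ a b' t, PySem.List.sorted l pvKey = a :: b' :: t := by
    cases h1 : PySem.List.sorted l pvKey with
    | nil => rw [h1] at hslen; simp at hslen
    | cons a rest =>
        cases h2 : rest with
        | nil => rw [h1, h2] at hslen; simp at hslen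
        | cons b' t => exact ⟨a, b', t, rfl⟩
  have hmema : a ∈ l := hperm.mem_iff.mp (by rw [hs]; simp)
  have hmemb : b' ∈ l := hperm.mem_iff.mp (by rw [hs]; simp)
  have hfst_mem : ∀ z ∈ l, z.1 ∈ ds := by
    intro z hz; rw [← hmapfst]; exact List.mem_map_of_mem hz
  have hheadle : ∀ z ∈ l, pvKey a ≤ pvKey z := PySem.List.key_head_sorted_le l pvKey hs
  have ha1 : a.1 = m := by
    have h1 : m ≤ a.1 := hmmin _ (hfst_mem a hmema)
    obtain ⟨z, hzmem, hz1⟩ : ∃ z ∈ l, z.1 = m := by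
      rw [← hmapfst] at hmmem
      obtain ⟨z, hz, hz1⟩ := List.mem_map.mp hmmem
      exact ⟨z, hz, hz1⟩
    have h2 : a.1 ≤ z.1 := pvKey_le_fst (hheadle z hzmem)
    omega
  -- count bridge
  have hcnt : PySem.List.count ds m = l.countP (fun z => z.1 == m) := by
    rw [PySem.List.count_eq, ← hmapfst, List.count_eq_countP, List.countP_map]
    rfl
  have hcntP : (PySem.List.sorted l pvKey).countP (fun z => z.1 == m) = l.countP (fun z => z.1 == m) :=
    hperm.countP_eq _
  have hcntpos : 1 ≤ PySem.List.count ds m := by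
    rw [PySem.List.count_eq]; exact List.count_pos_iff.mpr hmmem
  by_cases hcase : PySem.List.count ds m = 1
  · -- unique minimum: both emit the same triple
    obtain ⟨k, hk⟩ : ∃ k, PySem.List.index? ds m = some k := by
      cases h : PySem.List.index? ds m with
      | none =>
          have := (PySem.List.index?_isSome_iff ds m).mpr hmmem
          rw [h] at this; simp at this
      | some k => exact ⟨k, rfl⟩
    obtain ⟨hklt, hdk, _⟩ := PySem.List.getElem_of_index?_eq_some hk
    have hkp : k < points.length := by omega
    have hcl : l.countP (fun z => z.1 == m) = 1 := by rw [← hcnt]; exact hcase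
    have hb1 : b'.1 ≠ m := by
      rw [hs] at hcntP
      simp only [List.countP_cons] at hcntP
      have hpa : (a.1 == m) = true := by simp [ha1]
      intro hpb
      have hpb' : (b'.1 == m) = true := by simp [hpb]
      rw [hpa, hpb'] at hcntP
      simp at hcntP
      omega
    have hne : a.1 ≠ b'.1 := by rw [ha1]; exact fun h => hb1 h.symm
    have hz0 : ((m, (k : Int)) : Int × Int) ∈ l := by
      have he : ((0 + (k : Int), points[k]) : Int × (Int × Int)) ∈ PySem.List.enumerate points 0 :=
        (PySem.List.mem_enumerate_iff points 0 _).mpr ⟨k, hkp, rfl⟩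
      have hmm := List.mem_map_of_mem (f := fun ip : Int × (Int × Int) => (pvDistA (x, y) ip.2, ip.1)) he
      rw [← hl] at hmm
      have hdv : pvDistA (x, y) points[k] = m := by
        have h1 : ds[k] = pvDistA (x, y) points[k] := by
          simp [hds, pvDistA]
        rw [← h1]
        exact hdk
      simpa [hdv] using hmm
    have ha2 : a = ((m, (k : Int)) : Int × Int) := by
      by_contra hneq
      have := pvtwo_le_countP (fun z : Int × Int => z.1 == m) l hmema hz0 hneq
        (by simp [ha1]) (by simp)
      omega
    -- reduce both sides
    rw [pvStepA, pvStepB]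
    simp only [← hl, ← hds, hs2, hs, hm]
    rw [if_pos hcase, hk]
    have hmb : ¬ m = b'.1 := fun h => hb1 h.symm
    simp [ha2, hmb]
  · -- tied minimum: both emit nothing
    have h2 : 2 ≤ l.countP (fun z => z.1 == m) := by omega
    have hb1 : b'.1 = m := by
      rw [hs] at hcntP
      simp only [List.countP_cons] at hcntP
      have hpa : (a.1 == m) = true := by simp [ha1]
      by_cases hpb : b'.1 = m
      · exact hpb
      · exfalso
        have hpb' : (b'.1 == m) = false := by simp [hpb]
        rw [hpa, hpb'] at hcntP
        simp at hcntP
        obtain ⟨c, hc, hpc⟩ := List.countP_pos_iff.mp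
          (by omega : 0 < t.countP (fun z => z.1 == m))
        have hc1 : c.1 = m := by simpa using hpc
        have hble : pvKey b' ≤ pvKey c := by
          rw [hs] at hpw
          exact (List.pairwise_cons.mp ((List.pairwise_cons.mp hpw).2)).1 c hc
        have h3 := pvKey_le_fst hble
        have h4 := hmmin _ (hfst_mem b' hmemb)
        omega
    have hnn : ¬ (a.1 ≠ b'.1) := by rw [ha1, hb1]; simp
    rw [pvStepA, pvStepB]
    simp only [← hl, ← hds, hs2, hs, hm]
    rw [if_neg hcase]
    simp [hnn]

-- ===== VERDICT (by name: the statement is the Claim_ definition above) =====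
theorem map_the_grid_spec : Claim_equal_map_the_grid := by
  intro points _hdom hpre
  unfold Spec_map_the_grid
  have hp : 2 ≤ points.length := hpre
  obtain ⟨p0, rest, rfl⟩ : ∃ p0 rest, points = p0 :: rest := by
    cases points with
    | nil => simp [Pre_map_the_grid] at hpre
    | cons p0 rest => exact ⟨p0, rest, rfl⟩
  simp only [map_the_grid, map_the_grid_alt, List.map_cons,
    PySem.List.min?_id_cons, PySem.List.max?_id_cons]
  rw [List.foldl_flatMap]
  apply PySem.List.foldl_congr_mem
  intro acc y _
  rw [List.foldl_map]
  apply PySem.List.foldl_congr_mem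
  intro acc2 x _
  exact pvcell_eq _ hp acc2 x y
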